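-- pv_equiv track=rewrite | github.com/Velikolay/playground | interviews/solaredge_find_batteries.py | find_batteries
-- ===== SOURCE A (Python) =====
-- from typing import List, Optional
--
-- def find_batteries(capacity: int, batteries: List[int]) -> Optional[List[int]]:
--     b1, b2 = batteries[0], batteries[1]
--     curr_capacity = capacity
--
--     while curr_capacity > b1:
--         num_b1 = curr_capacity // b1
--         remaining = capacity - num_b1 * b1
--         if remaining % b2 == 0:
--             return [num_b1, remaining // b2]
--
--         curr_capacity -= b1
--
--     if capacity % b2 == 0:
--         return [0, capacity // b2]
--
--     return None
-- ===== SOURCE B (Python) =====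
-- from typing import List, Optional
--
--
-- def _egcd(a, b):
--     # extended Euclid: returns (g, x, y) with a*x + b*y == g == gcd(a, b)
--     if b == 0:
--         return (a, 1, 0)
--     g, x, y = _egcd(b, a % b)
--     return (g, y, x - (a // b) * y)
--
--
-- def find_batteries(capacity: int, batteries: List[int]) -> Optional[List[int]]:
--     b1, b2 = batteries[0], batteries[1]
--     n_max = capacity // b1
--     if n_max < 0:
--         n_max = 0
--     g, x, _ = _egcd(b1, abs(b2))
--     if capacity % g != 0:
--         return None
--     m = abs(b2) // g
--     n0 = (capacity // g) * x % m
--     if n0 > n_max: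
--         return None
--     n = n_max - (n_max - n0) % m
--     return [n, (capacity - n * b1) // b2]
-- ===== Notes on version B (the rewrite author's own statement) =====
-- stated objective: faster
-- what changed: B replaces A's downward trial loop over num_b1 (O(capacity/b1) divisibility checks) by an extended-Euclid computation: it solves num_b1*b1 ≡ capacity (mod b2) directly and takes the largest solution ≤ capacity//b1, using O(log) arithmetic operations.
-- intended difference: When capacity = batteries[0], A's strict loop guard (curr > b1) skips num_b1 = 1 and returns [0, capacity//b2] or None, while B returns the exact decomposition [1, 0], which is the intended answer. — e.g. on find_batteries(5, [5, 3]): A returns none, B returns some [1, 0]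
-- outside the precondition, e.g. on find_batteries(0, [0, 3]): A returns [0, 0], B raises ZeroDivisionError; on find_batteries(-7, [-3, 2]): A returns None, B returns [1, -2]
import Mathlib
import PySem

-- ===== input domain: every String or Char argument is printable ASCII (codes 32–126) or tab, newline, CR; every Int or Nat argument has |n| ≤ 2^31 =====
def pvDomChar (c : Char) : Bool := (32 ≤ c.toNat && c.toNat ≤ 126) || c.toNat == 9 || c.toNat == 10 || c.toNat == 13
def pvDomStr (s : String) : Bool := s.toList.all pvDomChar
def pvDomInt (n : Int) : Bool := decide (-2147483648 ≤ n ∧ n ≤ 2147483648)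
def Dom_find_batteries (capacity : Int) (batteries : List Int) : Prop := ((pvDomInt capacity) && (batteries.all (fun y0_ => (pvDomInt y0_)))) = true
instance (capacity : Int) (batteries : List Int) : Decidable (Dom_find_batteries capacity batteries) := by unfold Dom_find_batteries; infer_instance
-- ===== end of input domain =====

-- B replaces A's O(capacity/b1) downward scan by an extended-Euclid computation of the largest
-- valid num_b1 (O(log) arithmetic); on inputs with capacity = batteries[0] A misses the solution
-- [1, 0] (its loop guard is strict), B returns it — see D_find_batteries.


-- ===== PORT A =====
-- the while loop; fuel is a totality guard only (Python diverges when b1 ≤ 0 < curr - b1,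
-- which Pre_ excludes; with 0 < b1 the supplied fuel is never exhausted)
def findLoopA (capacity b1 b2 : Int) : Nat → Int → Option (List Int)
  | 0, _ => none
  | fuel + 1, curr =>
    if b1 < curr then
      let num_b1 := PySem.Int.floordiv curr b1
      let remaining := capacity - num_b1 * b1
      if PySem.Int.mod remaining b2 = 0 then some [num_b1, PySem.Int.floordiv remaining b2]
      else findLoopA capacity b1 b2 fuel (curr - b1)
    else
      if PySem.Int.mod capacity b2 = 0 then some [0, PySem.Int.floordiv capacity b2]
      else none

def find_batteries (capacity : Int) (batteries : List Int) : Option (List Int) :=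
  match PySem.List.pyGet? batteries 0, PySem.List.pyGet? batteries 1 with
  | some b1, some b2 => findLoopA capacity b1 b2 ((capacity - b1).toNat + 1) capacity
  | _, _ => none  -- IndexError (len < 2); outside Pre_

-- ===== PORT B =====
-- extended Euclid: (g, x, y) with a*x + b*y = g = gcd(a, b); fuel is a totality guard only
-- (Python recursion terminates on every call B makes: second argument is abs(b2) ≥ 0)
def egcdB : Nat → Int → Int → Int × Int × Int
  | 0, a, _ => (a, 1, 0)
  | fuel + 1, a, b =>
    if b ≤ 0 then (a, 1, 0)  -- Python tests b == 0; b < 0 never occurs on B's calls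
    else
      let r := egcdB fuel b (PySem.Int.mod a b)
      (r.1, r.2.2, r.2.1 - PySem.Int.floordiv a b * r.2.2)

def altCore (capacity b1 b2 : Int) : Option (List Int) :=
  let nmax0 := PySem.Int.floordiv capacity b1
  let n_max := if nmax0 < 0 then 0 else nmax0
  let e := egcdB (|b2|.toNat + 1) b1 |b2|
  if PySem.Int.mod capacity e.1 ≠ 0 then none
  else
    let m := PySem.Int.floordiv |b2| e.1
    let n0 := PySem.Int.mod (PySem.Int.floordiv capacity e.1 * e.2.1) m
    if n0 > n_max then none
    else
      let n := n_max - PySem.Int.mod (n_max - n0) m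
      some [n, PySem.Int.floordiv (capacity - n * b1) b2]

def find_batteries_alt (capacity : Int) (batteries : List Int) : Option (List Int) :=
  match PySem.List.pyGet? batteries 0 with
  | none => none  -- IndexError (len < 2); outside Pre_
  | some b1 =>
    match PySem.List.pyGet? batteries 1 with
    | none => none  -- IndexError (len < 2); outside Pre_
    | some b2 => altCore capacity b1 b2

-- ===== PRECONDITION & SPEC =====
-- Pre_ excludes: len(batteries) < 2 (A raises IndexError), batteries[1] = 0 (A raises
-- ZeroDivisionError), and batteries[0] ≤ 0 (A diverges whenever capacity > batteries[0], and
-- raises ZeroDivisionError when batteries[0] = 0 < capacity; on the remaining degenerate inputs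
-- with batteries[0] ≤ 0 ≥ capacity the loop is vacuous and A's value is an accident of them).
def Pre_find_batteries (_capacity : Int) (batteries : List Int) : Prop :=
  2 ≤ batteries.length ∧ 0 < batteries.getD 0 0 ∧ batteries.getD 1 0 ≠ 0
instance (capacity : Int) (batteries : List Int) : Decidable (Pre_find_batteries capacity batteries) := by unfold Pre_find_batteries; infer_instance

def pvWitness_find_batteries : Int × List Int := (7, [3, 2])

-- When capacity = batteries[0], A's strict loop guard skips num_b1 = 1, so A returns
-- [0, capacity/b2] or None although [1, 0] is an exact decomposition; B returns the intended [1, 0].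
def D_find_batteries (capacity : Int) (batteries : List Int) : Prop :=
  batteries.getD 0 0 = capacity
instance (capacity : Int) (batteries : List Int) : Decidable (D_find_batteries capacity batteries) := by unfold D_find_batteries; infer_instance

def Spec_find_batteries (capacity : Int) (batteries : List Int) (out : Option (List Int)) : Prop := ¬ D_find_batteries capacity batteries → out = find_batteries_alt capacity batteries
instance (capacity : Int) (batteries : List Int) (out : Option (List Int)) : Decidable (Spec_find_batteries capacity batteries out) := by unfold Spec_find_batteries; infer_instance

def pvDiffWitness_find_batteries : Int × List Int := (5, [5, 3])
def pvDiffWitnessOut_find_batteries : (Option (List Int)) × (Option (List Int)) := (none, some [1, 0])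

-- ===== CLAIM (what is proved, stated in full; the proofs are below) =====
def Claim_unchanged_find_batteries : Prop := ∀ (capacity : Int) (batteries : List Int), Dom_find_batteries capacity batteries → Pre_find_batteries capacity batteries → Spec_find_batteries capacity batteries (find_batteries capacity batteries)
def Claim_changed_find_batteries : Prop := Dom_find_batteries (pvDiffWitness_find_batteries.1) (pvDiffWitness_find_batteries.2) ∧ Pre_find_batteries (pvDiffWitness_find_batteries.1) (pvDiffWitness_find_batteries.2) ∧ D_find_batteries (pvDiffWitness_find_batteries.1) (pvDiffWitness_find_batteries.2) ∧ find_batteries (pvDiffWitness_find_batteries.1) (pvDiffWitness_find_batteries.2) = pvDiffWitnessOut_find_batteries.1 ∧ find_batteries_alt (pvDiffWitness_find_batteries.1) (pvDiffWitness_find_batteries.2) = pvDiffWitnessOut_find_batteries.2 ∧ pvDiffWitnessOut_find_batteries.1 ≠ pvDiffWitnessOut_find_batteries.2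
def Claim_exact_find_batteries : Prop := ∀ (capacity : Int) (batteries : List Int), Dom_find_batteries capacity batteries → Pre_find_batteries capacity batteries → D_find_batteries capacity batteries → find_batteries capacity batteries ≠ find_batteries_alt capacity batteries

-- ===== LEMMAS AND PROOFS =====

-- reference value: greatest n ≤ N with b2 ∣ capacity - n*b1, searched downward
def scanSol (capacity b1 b2 : Int) : Nat → Option Int
  | 0 => if b2 ∣ capacity then some 0 else none
  | n + 1 => if b2 ∣ (capacity - ((n : Int) + 1) * b1) then some ((n : Int) + 1)
             else scanSol capacity b1 b2 n

def render (capacity b1 b2 n : Int) : List Int :=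
  [n, PySem.Int.floordiv (capacity - n * b1) b2]

lemma fdiv_sub_self (curr b1 : Int) (h : b1 ≠ 0) :
    PySem.Int.floordiv (curr - b1) b1 = PySem.Int.floordiv curr b1 - 1 := by
  simp only [PySem.Int.floordiv]
  have h2 := Int.add_mul_fdiv_right curr (-1) h
  have h3 : curr - b1 = curr + (-1) * b1 := by ring
  rw [h3, h2]; ring

lemma exit_case (capacity b1 b2 : Int) (f : Nat) (curr : Int) (hlt : ¬ b1 < curr) :
    findLoopA capacity b1 b2 (f + 1) curr
      = (scanSol capacity b1 b2 0).map (render capacity b1 b2) := by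
  simp only [findLoopA, if_neg hlt]
  by_cases hd : b2 ∣ capacity
  · have : PySem.Int.mod capacity b2 = 0 := (PySem.Int.mod_eq_zero_iff_dvd _ _).mpr hd
    simp [scanSol, hd, this, render]
  · have : ¬ PySem.Int.mod capacity b2 = 0 := fun h => hd ((PySem.Int.mod_eq_zero_iff_dvd _ _).mp h)
    simp [scanSol, hd, this]

lemma loopA_scan (capacity b1 b2 : Int) (hb1 : 0 < b1) (k : Nat) :
    ∀ (curr : Int) (fuel : Nat), ¬ b1 ∣ curr → (PySem.Int.floordiv curr b1).toNat = k →
      (curr - b1).toNat < fuel →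
      findLoopA capacity b1 b2 fuel curr
        = (scanSol capacity b1 b2 k).map (render capacity b1 b2) := by
  induction k with
  | zero =>
    intro curr fuel hnd hQ hfuel
    obtain ⟨f, rfl⟩ : ∃ f, fuel = f + 1 := ⟨fuel - 1, by omega⟩
    have hlt : ¬ b1 < curr := by
      intro hbc
      have h1 : (1 : Int) ≤ PySem.Int.floordiv curr b1 :=
        (PySem.Int.le_floordiv_iff_mul_le hb1).mpr (by omega)
      omega
    exact exit_case capacity b1 b2 f curr hlt
  | succ j ih =>
    intro curr fuel hnd hQ hfuel
    have hQ1 : (1 : Int) ≤ PySem.Int.floordiv curr b1 := by omega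
    have hble : b1 ≤ curr := by
      have := (PySem.Int.le_floordiv_iff_mul_le hb1).mp hQ1; omega
    have hbc : b1 < curr := by
      rcases lt_or_eq_of_le hble with h | h
      · exact h
      · exact absurd (h ▸ dvd_refl b1) hnd
    obtain ⟨f, rfl⟩ : ∃ f, fuel = f + 1 := ⟨fuel - 1, by omega⟩
    simp only [findLoopA, if_pos hbc]
    have hQ' : PySem.Int.floordiv curr b1 = (j : Int) + 1 := by omega
    rw [hQ']
    by_cases hdv : b2 ∣ (capacity - ((j : Int) + 1) * b1)
    · have : PySem.Int.mod (capacity - ((j : Int) + 1) * b1) b2 = 0 :=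
        (PySem.Int.mod_eq_zero_iff_dvd _ _).mpr hdv
      simp [scanSol, hdv, this, render]
    · have hm : ¬ PySem.Int.mod (capacity - ((j : Int) + 1) * b1) b2 = 0 :=
        fun h => hdv ((PySem.Int.mod_eq_zero_iff_dvd _ _).mp h)
      rw [if_neg hm]
      have hnd' : ¬ b1 ∣ (curr - b1) := by
        intro hc
        exact hnd (by
          have : b1 ∣ (curr - b1) + b1 := dvd_add hc (dvd_refl b1)
          simpa using this)
      have hQ'' : (PySem.Int.floordiv (curr - b1) b1).toNat = j := by
        rw [fdiv_sub_self curr b1 hb1.ne', hQ']; omega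
      have hfe : (curr - b1 - b1).toNat < f := by omega
      rw [ih (curr - b1) f hnd' hQ'' hfe]
      simp [scanSol, hdv]

lemma loopA_top (capacity b1 b2 : Int) (hb1 : 0 < b1) (hne : capacity ≠ b1) :
    findLoopA capacity b1 b2 ((capacity - b1).toNat + 1) capacity
      = (scanSol capacity b1 b2 (PySem.Int.floordiv capacity b1).toNat).map
          (render capacity b1 b2) := by
  by_cases hdvd : b1 ∣ capacity
  · by_cases hlt : b1 < capacity
    · obtain ⟨q, hq⟩ := hdvd
      have hq2 : 2 ≤ q := by nlinarith
      have hfd : PySem.Int.floordiv capacity b1 = q := by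
        rw [PySem.Int.floordiv_eq_ediv_of_pos hb1, hq, Int.mul_ediv_cancel_left q hb1.ne']
      obtain ⟨j, hj⟩ : ∃ j : Nat, q.toNat = j + 1 := ⟨q.toNat - 1, by omega⟩
      have hjq : ((j : Int) + 1) = q := by omega
      have hrem : capacity - PySem.Int.floordiv capacity b1 * b1 = 0 := by
        rw [hfd, hq]; ring
      simp only [findLoopA, if_pos hlt, hrem]
      have hm0 : PySem.Int.mod 0 b2 = 0 := (PySem.Int.mod_eq_zero_iff_dvd _ _).mpr (dvd_zero b2)
      rw [if_pos hm0, hfd, hj]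
      simp only [scanSol, hjq]
      have hzq : capacity - q * b1 = 0 := by rw [hq]; ring
      rw [if_pos (show b2 ∣ capacity - q * b1 by rw [hzq]; exact dvd_zero b2)]
      simp only [Option.map_some, render, hzq]
    · have hle : capacity < b1 := lt_of_le_of_ne (by omega) hne
      have hQ0 : (PySem.Int.floordiv capacity b1).toNat = 0 := by
        have h1 : PySem.Int.floordiv capacity b1 < 1 :=
          (PySem.Int.floordiv_lt_iff_lt_mul hb1).mpr (by omega)
        omega
      rw [hQ0]
      exact exit_case capacity b1 b2 _ capacity hlt
  · exact loopA_scan capacity b1 b2 hb1 _ capacity _ hdvd rfl (by omega)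

lemma egcd_spec : ∀ (fuel k : Nat) (a : Int), k < fuel → 0 < a →
    0 < (egcdB fuel a (k : Int)).1 ∧ (egcdB fuel a (k : Int)).1 ∣ a ∧
      (egcdB fuel a (k : Int)).1 ∣ (k : Int) ∧
      a * (egcdB fuel a (k : Int)).2.1 + (k : Int) * (egcdB fuel a (k : Int)).2.2
        = (egcdB fuel a (k : Int)).1 := by
  intro fuel
  induction fuel with
  | zero => intro k a hk; exact absurd hk (Nat.not_lt_zero k)
  | succ f ih =>
    intro k a hk ha
    by_cases hk0 : k = 0
    · subst hk0
      simp [egcdB, ha]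
    · have hkpos : (0 : Int) < (k : Int) := by exact_mod_cast Nat.pos_of_ne_zero hk0
      have hcond : ¬ ((k : Int) ≤ 0) := by omega
      simp only [egcdB, if_neg hcond]
      have hr0 : 0 ≤ PySem.Int.mod a k := PySem.Int.mod_nonneg a hkpos
      have hrk : PySem.Int.mod a k < k := PySem.Int.mod_lt a hkpos
      have hre : PySem.Int.mod a (k : Int) = ((PySem.Int.mod a (k : Int)).toNat : Int) :=
        (Int.toNat_of_nonneg hr0).symm
      have ih' := ih (PySem.Int.mod a (k : Int)).toNat (k : Int) (by omega) hkpos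
      rw [← hre] at ih'
      obtain ⟨hpos, hdk, hdr, hbez⟩ := ih'
      have hmod : PySem.Int.mod a (k : Int) = a - (k : Int) * PySem.Int.floordiv a (k : Int) := by
        rw [PySem.Int.mod_eq_emod_of_pos hkpos, PySem.Int.floordiv_eq_ediv_of_pos hkpos]
        exact Int.emod_def a k
      refine ⟨hpos, ?_, hdk, ?_⟩
      · -- g ∣ a from g ∣ k and g ∣ a % k
        have : (egcdB f (k : Int) (PySem.Int.mod a (k : Int))).1 ∣
            (k : Int) * PySem.Int.floordiv a (k : Int) + PySem.Int.mod a (k : Int) :=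
          dvd_add (hdk.mul_right _) hdr
        have heq : (k : Int) * PySem.Int.floordiv a (k : Int) + PySem.Int.mod a (k : Int) = a := by
          rw [hmod]; ring
        rwa [heq] at this
      · rw [← hbez, hmod]; ring

lemma not_dvd_all (capacity b1 b2 g : Int) (hgb1 : g ∣ b1) (hgb2 : g ∣ b2)
    (h : ¬ g ∣ capacity) : ∀ n : Int, ¬ b2 ∣ (capacity - n * b1) := by
  intro n hdv
  apply h
  have h1 : g ∣ (capacity - n * b1) + n * b1 := dvd_add (hgb2.trans hdv) (hgb1.mul_left n)
  simpa using h1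

lemma period_iff (capacity b1 b2 g x y n0 : Int) (hg : 0 < g)
    (hgb1 : g ∣ b1) (hgb2 : g ∣ |b2|) (hbez : b1 * x + |b2| * y = g)
    (hn0 : b2 ∣ capacity - n0 * b1) (n : Int) :
    b2 ∣ (capacity - n * b1) ↔ (|b2| / g) ∣ (n - n0) := by
  obtain ⟨d, hd⟩ := hgb1
  obtain ⟨c, hc⟩ := hgb2
  have hmc : |b2| / g = c := by rw [hc, Int.mul_ediv_cancel_left c hg.ne']
  rw [hmc]
  constructor
  · intro hdvd
    have hsub : b2 ∣ (n - n0) * b1 := by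
      have h' := dvd_sub hn0 hdvd
      have he : (capacity - n0 * b1) - (capacity - n * b1) = (n - n0) * b1 := by ring
      rwa [he] at h'
    have habs : |b2| ∣ (n - n0) * b1 := (abs_dvd b2 _).mpr hsub
    obtain ⟨t, ht⟩ := habs
    -- (n - n0) * (g*d) = g*c*t  → (n - n0) * d = c * t
    have hgd : g * ((n - n0) * d) = g * (c * t) := by
      have : (n - n0) * b1 = |b2| * t := ht
      rw [hd, hc] at this; linarith [this]
    have hcd : (n - n0) * d = c * t := by
      exact mul_left_cancel₀ hg.ne' hgd
    have hcop : IsCoprime c d := by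
      refine ⟨y, x, ?_⟩
      -- from b1*x + |b2|*y = g : (g*d)*x + (g*c)*y = g → d*x + c*y = 1
      have h1 : g * (y * c + x * d) = g * 1 := by
        rw [hd, hc] at hbez; linarith [hbez]
      exact mul_left_cancel₀ hg.ne' h1
    exact hcop.dvd_of_dvd_mul_right ⟨t, hcd⟩
  · intro hdvd
    obtain ⟨t, ht⟩ := hdvd
    have he : capacity - n * b1 = (capacity - n0 * b1) - (n - n0) * b1 := by ring
    rw [he]
    apply dvd_sub hn0
    have habs : |b2| ∣ (n - n0) * b1 := ⟨d * t, by rw [ht, hd, hc]; ring⟩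
    exact (abs_dvd b2 _).mp habs

lemma scan_formula (capacity b1 b2 m n0 : Int) (hm : 0 < m) (h0 : 0 ≤ n0) (h1 : n0 < m)
    (hiff : ∀ n : Int, b2 ∣ (capacity - n * b1) ↔ m ∣ (n - n0)) :
    ∀ N : Nat, scanSol capacity b1 b2 N
      = if n0 ≤ (N : Int) then some ((N : Int) - ((N : Int) - n0) % m) else none := by
  have hdvd_small : ∀ a : Int, -m < a → a < m → m ∣ a → a = 0 := by
    intro a ha1 ha2 ⟨t, ht⟩
    rcases (by omega : t ≤ -1 ∨ t = 0 ∨ 1 ≤ t) with h | h | h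
    · have : m * t ≤ m * (-1) := mul_le_mul_of_nonneg_left h hm.le
      omega
    · subst h; omega
    · have : m * 1 ≤ m * t := mul_le_mul_of_nonneg_left h hm.le
      omega
  intro N
  induction N with
  | zero =>
    have hiff0 : b2 ∣ capacity ↔ m ∣ (0 - n0) := by
      have := hiff 0; simpa using this
    by_cases hn : n0 = 0
    · subst hn
      rw [scanSol, if_pos (hiff0.mpr (by simp))]
      norm_num
    · have hnd : ¬ b2 ∣ capacity := by
        intro hc
        have hd := hiff0.mp hc
        have : -n0 = 0 := hdvd_small _ (by omega) (by omega) (by simpa using hd)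
        omega
      rw [scanSol, if_neg hnd, if_neg (by push_cast; omega)]
  | succ N ih =>
    have hcast : ((N + 1 : Nat) : Int) = (N : Int) + 1 := by push_cast; ring
    have hiffN : b2 ∣ (capacity - ((N : Int) + 1) * b1) ↔ m ∣ ((N : Int) + 1 - n0) := hiff _
    by_cases hc : m ∣ ((N : Int) + 1 - n0)
    · -- found at N+1
      have hle : n0 ≤ (N : Int) + 1 := by
        by_contra hgt
        have : (N : Int) + 1 - n0 = 0 := hdvd_small _ (by omega) (by omega) hc
        omega
      have hz : ((N : Int) + 1 - n0) % m = 0 := Int.emod_eq_zero_of_dvd hc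
      rw [scanSol, if_pos (hiffN.mpr hc), hcast, if_pos hle, hz]
      norm_num
    · rw [scanSol, if_neg (fun h => hc (hiffN.mp h)), ih, hcast]
      by_cases hle : n0 ≤ (N : Int)
      · rw [if_pos hle, if_pos (by omega)]
        have hr0 : 0 ≤ ((N : Int) - n0) % m := Int.emod_nonneg _ hm.ne'
        have hr1 : ((N : Int) - n0) % m < m := Int.emod_lt_of_pos _ hm
        have hcong : ((N : Int) + 1 - n0) % m = (((N : Int) - n0) % m + 1) % m := by
          conv_lhs => rw [show (N : Int) + 1 - n0 = ((N : Int) - n0) + 1 by ring]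
          rw [Int.add_emod ((N : Int) - n0) 1 m, Int.add_emod (((N : Int) - n0) % m) 1 m,
            Int.emod_emod_of_dvd _ (dvd_refl m)]
        have hne_top : ((N : Int) - n0) % m ≠ m - 1 := by
          intro he
          apply hc
          rw [Int.dvd_iff_emod_eq_zero, hcong, he]
          simp
        have hsmall : (((N : Int) - n0) % m + 1) % m = ((N : Int) - n0) % m + 1 :=
          Int.emod_eq_of_lt (by omega) (by omega)
        rw [hcong, hsmall]
        congr 1; ring
      · have hne1 : n0 ≠ (N : Int) + 1 := by
          intro he; exact hc (by rw [← he]; simp)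
        rw [if_neg hle, if_neg (show ¬ n0 ≤ (N : Int) + 1 by omega)]

lemma scan_none (capacity b1 b2 : Int) (h : ∀ n : Int, ¬ b2 ∣ (capacity - n * b1)) :
    ∀ N, scanSol capacity b1 b2 N = none := by
  intro N
  induction N with
  | zero =>
    have h0 : ¬ b2 ∣ capacity := by have := h 0; simpa using this
    simp [scanSol, h0]
  | succ j ih =>
    simp [scanSol, h ((j : Int) + 1), ih]

lemma altCore_scan (capacity b1 b2 : Int) (hb1 : 0 < b1) (hb2 : b2 ≠ 0) :
    altCore capacity b1 b2
      = (scanSol capacity b1 b2 (PySem.Int.floordiv capacity b1).toNat).map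
          (render capacity b1 b2) := by
  have habs : |b2| = ((b2.natAbs : Nat) : Int) := Int.abs_eq_natAbs b2
  have htn : |b2|.toNat = b2.natAbs := by omega
  have espec := egcd_spec (|b2|.toNat + 1) b2.natAbs b1 (by omega) hb1
  rw [← habs] at espec
  obtain ⟨hgpos, hgb1, hgabs, hbez⟩ := espec
  set e := egcdB (|b2|.toNat + 1) b1 |b2| with he
  set g := e.1 with hgdef
  have hgb2 : g ∣ b2 := (dvd_abs g b2).mp hgabs
  obtain ⟨c, hc⟩ := hgabs
  have hcval : |b2| / g = c := by rw [hc, Int.mul_ediv_cancel_left c hgpos.ne']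
  have habspos : 0 < |b2| := abs_pos.mpr hb2
  have hcpos : 0 < c := by
    by_contra hcle
    have : g * c ≤ 0 := mul_nonpos_of_nonneg_of_nonpos hgpos.le (by omega)
    omega
  have hmfd : PySem.Int.floordiv |b2| g = c := by
    rw [PySem.Int.floordiv_eq_ediv_of_pos hgpos, hcval]
  by_cases hcap : g ∣ capacity
  · -- solvable case
    have hmod0 : PySem.Int.mod capacity g = 0 := (PySem.Int.mod_eq_zero_iff_dvd _ _).mpr hcap
    obtain ⟨cc, hcc⟩ := hcap
    have hq : PySem.Int.floordiv capacity g = cc := by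
      rw [PySem.Int.floordiv_eq_ediv_of_pos hgpos, hcc, Int.mul_ediv_cancel_left cc hgpos.ne']
    obtain ⟨d, hd⟩ := hgb1
    set x := e.2.1 with hxdef
    simp only [altCore, if_neg (not_not_intro hmod0), ← he, ← hgdef, ← hxdef]
    rw [hmfd, hq]
    set n0 := PySem.Int.mod (cc * x) c with hn0def
    have hn0e : n0 = (cc * x) % c := by
      rw [hn0def, PySem.Int.mod_eq_emod_of_pos hcpos]
    have hn00 : 0 ≤ n0 := by
      rw [hn0e]; exact Int.emod_nonneg _ hcpos.ne'
    have hn0c : n0 < c := by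
      rw [hn0e]; exact Int.emod_lt_of_pos _ hcpos
    have hn0sol : b2 ∣ capacity - n0 * b1 := by
      have h1 : |b2| ∣ capacity - (cc * x) * b1 :=
        ⟨cc * e.2.2, by linear_combination hcc - cc * hbez⟩
      have h2 : cc * x - n0 = c * ((cc * x) / c) := by
        rw [hn0e]
        have := Int.emod_def (cc * x) c
        omega
      have h3 : |b2| ∣ (cc * x - n0) * b1 :=
        ⟨((cc * x) / c) * d, by rw [h2, hd, hc]; ring⟩
      have h4 : |b2| ∣ capacity - n0 * b1 := by
        have h5 := dvd_add h1 h3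
        have heq : (capacity - cc * x * b1) + (cc * x - n0) * b1 = capacity - n0 * b1 := by ring
        rwa [heq] at h5
      exact (abs_dvd b2 _).mp h4
    have hiff : ∀ n : Int, b2 ∣ (capacity - n * b1) ↔ c ∣ (n - n0) := by
      intro n
      have hpf := period_iff capacity b1 b2 g x e.2.2 n0 hgpos ⟨d, hd⟩ ⟨c, hc⟩ hbez hn0sol n
      rwa [hcval] at hpf
    have hsf := scan_formula capacity b1 b2 c n0 hcpos hn00 hn0c hiff
      (PySem.Int.floordiv capacity b1).toNat
    have hN : (((PySem.Int.floordiv capacity b1).toNat : Nat) : Int)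
        = (if PySem.Int.floordiv capacity b1 < 0 then 0 else PySem.Int.floordiv capacity b1) := by
      rw [Int.ofNat_toNat]; omega
    rw [hsf, hN]
    set nmax : Int :=
      if PySem.Int.floordiv capacity b1 < 0 then 0 else PySem.Int.floordiv capacity b1
      with hnmax
    by_cases hgt : n0 > nmax
    · rw [if_pos hgt, if_neg (show ¬ n0 ≤ nmax by omega)]
      simp
    · rw [if_neg hgt, if_pos (show n0 ≤ nmax by omega)]
      simp only [Option.map_some, render]
      rw [PySem.Int.mod_eq_emod_of_pos hcpos]
  · -- unsolvable case
    have hmodne : PySem.Int.mod capacity g ≠ 0 :=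
      fun h => hcap ((PySem.Int.mod_eq_zero_iff_dvd _ _).mp h)
    have hnone := scan_none capacity b1 b2 (not_dvd_all capacity b1 b2 g hgb1 hgb2 hcap)
      (PySem.Int.floordiv capacity b1).toNat
    simp only [altCore, if_pos hmodne, ← he, ← hgdef, hnone, Option.map_none]

lemma pyGet_cons2_0 {b1 b2 : Int} {rest : List Int} :
    PySem.List.pyGet? (b1 :: b2 :: rest) 0 = some b1 := by
  simp [pysem]

lemma pyGet_cons2_1 {b1 b2 : Int} {rest : List Int} :
    PySem.List.pyGet? (b1 :: b2 :: rest) 1 = some b2 := by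
  simp [pysem]

-- ===== VERDICT (by name: the statement is the Claim_ definition above) =====
theorem find_batteries_spec : Claim_unchanged_find_batteries := by
  intro capacity batteries _hdom hpre hnD
  unfold Pre_find_batteries at hpre
  match batteries with
  | [] => simp at hpre
  | [_] => simp at hpre
  | b1 :: b2 :: rest =>
    simp only [List.getD_cons_zero, List.getD_cons_succ] at hpre
    obtain ⟨_, hb1, hb2⟩ := hpre
    have hne : capacity ≠ b1 := by
      intro h
      exact hnD (by unfold D_find_batteries; simp [h])
    unfold find_batteries find_batteries_alt
    rw [pyGet_cons2_0, pyGet_cons2_1]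
    show findLoopA capacity b1 b2 ((capacity - b1).toNat + 1) capacity = altCore capacity b1 b2
    rw [loopA_top capacity b1 b2 hb1 hne, altCore_scan capacity b1 b2 hb1 hb2]

theorem find_batteries_changed : Claim_changed_find_batteries := by
  unfold Claim_changed_find_batteries; decide

theorem find_batteries_tight : Claim_exact_find_batteries := by
  intro capacity batteries _hdom hpre hD heq
  unfold Pre_find_batteries at hpre
  unfold D_find_batteries at hD
  match batteries with
  | [] => simp at hpre
  | [_] => simp at hpre
  | b1 :: b2 :: rest =>
    simp only [List.getD_cons_zero, List.getD_cons_succ] at hpre hD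
    obtain ⟨_, hb1, hb2⟩ := hpre
    subst hD
    unfold find_batteries find_batteries_alt at heq
    rw [pyGet_cons2_0, pyGet_cons2_1] at heq
    replace heq : findLoopA b1 b1 b2 ((b1 - b1).toNat + 1) b1 = altCore b1 b1 b2 := heq
    rw [altCore_scan b1 b1 b2 hb1 hb2] at heq
    -- B's side reduces to some [1, 0]
    have hfd1 : PySem.Int.floordiv b1 b1 = 1 := by
      rw [PySem.Int.floordiv_eq_ediv_of_pos hb1, Int.ediv_self hb1.ne']
    have hrhs : (scanSol b1 b1 b2 (PySem.Int.floordiv b1 b1).toNat).map (render b1 b1 b2)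
        = some [1, 0] := by
      rw [hfd1]
      show (scanSol b1 b1 b2 (0 + 1)).map (render b1 b1 b2) = some [1, 0]
      have hz0 : b1 - (((0 : Nat) : Int) + 1) * b1 = 0 := by push_cast; ring
      rw [scanSol, if_pos (show b2 ∣ b1 - (((0 : Nat) : Int) + 1) * b1 by
        rw [hz0]; exact dvd_zero b2)]
      simp only [Option.map_some, render, hz0]
      norm_num [PySem.Int.floordiv, Int.zero_fdiv]
    rw [hrhs] at heq
    -- A's side: fuel (b1-b1).toNat+1 = 1, loop guard b1 < b1 fails
    have hfuel : (b1 - b1).toNat + 1 = 0 + 1 := by omega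
    rw [hfuel] at heq
    simp only [findLoopA, lt_irrefl, if_false] at heq
    by_cases hm : PySem.Int.mod b1 b2 = 0
    · rw [if_pos hm] at heq
      simp at heq
    · rw [if_neg hm] at heq
      simp at heq
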